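-- pv_equiv track=rewrite | github.com/midnightnow/muse-platform | backend/muse/core/semantic_projection_engine.py | _create_word_context
-- ===== SOURCE A (Python) =====
-- def _create_word_context(word: str) -> str:
--     """Create context for a word for TF-IDF processing"""
--     # This is a simplified context creation
--     # In a real implementation, you might use word associations, definitions, etc.
--     word_lower = word.lower()
--
--     # Add common associations based on word patterns
--     context_words = [word]
--
--     # Add related words based on patterns
--     if any(pattern in word_lower for pattern in ['love', 'heart']):
--         context_words.extend(['emotion', 'feeling', 'passion', 'tender'])
--
--     if any(pattern in word_lower for pattern in ['light', 'bright', 'shine']):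
--         context_words.extend(['illumination', 'radiance', 'glow', 'luminous'])
--
--     if any(pattern in word_lower for pattern in ['dark', 'shadow', 'night']):
--         context_words.extend(['darkness', 'mystery', 'hidden', 'deep'])
--
--     if any(pattern in word_lower for pattern in ['time', 'moment', 'eternal']):
--         context_words.extend(['temporal', 'duration', 'infinity', 'forever'])
--
--     return ' '.join(context_words)
-- ===== SOURCE B (Python) =====
-- # Different algorithm: instead of searching each pattern in the word, enumerate the
-- # word's character windows (pattern lengths are 4..7) and look each window up in a
-- # hash map pattern -> category; then emit the extensions of the triggered categories.
-- _PATTERN_CAT = {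
--     'love': 0, 'heart': 0,
--     'light': 1, 'bright': 1, 'shine': 1,
--     'dark': 2, 'shadow': 2, 'night': 2,
--     'time': 3, 'moment': 3, 'eternal': 3,
-- }
-- _EXTENSIONS = [
--     ['emotion', 'feeling', 'passion', 'tender'],
--     ['illumination', 'radiance', 'glow', 'luminous'],
--     ['darkness', 'mystery', 'hidden', 'deep'],
--     ['temporal', 'duration', 'infinity', 'forever'],
-- ]
--
-- def _create_word_context(word: str) -> str:
--     """Create context for a word for TF-IDF processing"""
--     w = word.lower()
--     hits = set()
--     for i in range(len(w)):
--         for length in (4, 5, 6, 7):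
--             cat = _PATTERN_CAT.get(w[i:i + length])
--             if cat is not None:
--                 hits.add(cat)
--     context_words = [word]
--     for cat, ext in enumerate(_EXTENSIONS):
--         if cat in hits:
--             context_words.extend(ext)
--     return ' '.join(context_words)
-- ===== Notes on version B (the rewrite author's own statement) =====
-- stated objective: alternative
-- what changed: Instead of searching each of the 11 patterns in the word, B enumerates the lowercased word's character windows of lengths 4-7 once and looks each window up in a hash map pattern->category, collecting the triggered categories in a set before emitting their extension lists in order.
import Mathlib
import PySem

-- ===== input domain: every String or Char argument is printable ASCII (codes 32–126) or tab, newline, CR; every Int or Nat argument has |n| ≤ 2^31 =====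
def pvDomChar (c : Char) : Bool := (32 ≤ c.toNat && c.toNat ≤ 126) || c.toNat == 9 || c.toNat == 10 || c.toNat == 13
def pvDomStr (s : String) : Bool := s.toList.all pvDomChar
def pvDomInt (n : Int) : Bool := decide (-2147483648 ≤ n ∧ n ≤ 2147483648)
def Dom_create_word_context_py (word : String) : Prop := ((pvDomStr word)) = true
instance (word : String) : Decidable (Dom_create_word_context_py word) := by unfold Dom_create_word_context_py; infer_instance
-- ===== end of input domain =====

-- B scans the word's character windows (lengths 4..7) against a pattern→category map
-- instead of searching each pattern in the word (alternative algorithm; same output).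

-- ===== PORT A =====
def create_word_context_py (word : String) : String :=
  let word_lower := PySem.Str.lower word
  let context_words := [word]
  let context_words :=
    if ["love", "heart"].any (fun p => PySem.Str.isIn p word_lower) then
      context_words ++ ["emotion", "feeling", "passion", "tender"]
    else context_words
  let context_words :=
    if ["light", "bright", "shine"].any (fun p => PySem.Str.isIn p word_lower) then
      context_words ++ ["illumination", "radiance", "glow", "luminous"]
    else context_words
  let context_words :=
    if ["dark", "shadow", "night"].any (fun p => PySem.Str.isIn p word_lower) then
      context_words ++ ["darkness", "mystery", "hidden", "deep"]
    else context_words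
  let context_words :=
    if ["time", "moment", "eternal"].any (fun p => PySem.Str.isIn p word_lower) then
      context_words ++ ["temporal", "duration", "infinity", "forever"]
    else context_words
  PySem.Str.join " " context_words

-- ===== PORT B =====
-- _PATTERN_CAT : pattern → category index
def pvPatternCat : PySem.Dict String Int :=
  PySem.Dict.ofList
    [("love", 0), ("heart", 0),
     ("light", 1), ("bright", 1), ("shine", 1),
     ("dark", 2), ("shadow", 2), ("night", 2),
     ("time", 3), ("moment", 3), ("eternal", 3)]

-- _EXTENSIONS
def pvExtensions : List (List String) :=
  [["emotion", "feeling", "passion", "tender"],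
   ["illumination", "radiance", "glow", "luminous"],
   ["darkness", "mystery", "hidden", "deep"],
   ["temporal", "duration", "infinity", "forever"]]

-- the window scan: for i in range(len(w)): for length in (4,5,6,7): cat = _PATTERN_CAT.get(w[i:i+length]); if cat is not None: hits.add(cat)
def pvScanHits (w : String) : PySem.Set Int :=
  (PySem.List.pyRange 0 (PySem.Str.len w) 1).foldl
    (fun hits i =>
      ([4, 5, 6, 7] : List Int).foldl
        (fun hits length =>
          match pvPatternCat.get? (PySem.Str.slice w (some i) (some (i + length))) with
          | some cat => PySem.Set.add hits cat
          | none => hits)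
        hits)
    PySem.Set.empty

def create_word_context_py_alt (word : String) : String :=
  let w := PySem.Str.lower word
  let hits := pvScanHits w
  let context_words :=
    (PySem.List.enumerate pvExtensions 0).foldl
      (fun context_words p =>
        if hits.contains p.1 then context_words ++ p.2 else context_words)
      [word]
  PySem.Str.join " " context_words

-- ===== PRECONDITION & SPEC =====
def Spec_create_word_context_py (word : String) (out : String) : Prop := out = create_word_context_py_alt word
instance (word : String) (out : String) : Decidable (Spec_create_word_context_py word out) := by unfold Spec_create_word_context_py; infer_instance

-- ===== CLAIM =====
def Claim_equal_create_word_context_py : Prop := ∀ (word : String), Dom_create_word_context_py word → Spec_create_word_context_py word (create_word_context_py word)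

-- ===== LEMMAS AND PROOFS =====

-- membership in a fold whose step adds elements according to P
theorem mem_foldl_step {α : Type} (l : List α) (step : PySem.Set Int → α → PySem.Set Int)
    (P : α → Int → Prop) (h : ∀ s a y, y ∈ step s a ↔ y ∈ s ∨ P a y)
    (s0 : PySem.Set Int) (y : Int) :
    y ∈ l.foldl step s0 ↔ y ∈ s0 ∨ ∃ a ∈ l, P a y := by
  induction l generalizing s0 with
  | nil => simp
  | cons a l ih => simp [ih, h]; tauto

-- one window lookup adds exactly the looked-up category
theorem mem_matchAdd (s : PySem.Set Int) (o : Option Int) (y : Int) :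
    y ∈ (match o with | some cat => PySem.Set.add s cat | none => s) ↔ y ∈ s ∨ o = some y := by
  cases o <;> simp [PySem.Set.mem_add]; tauto

theorem mem_scanHits (w : String) (y : Int) :
    y ∈ pvScanHits w ↔
      ∃ i ∈ PySem.List.pyRange 0 (PySem.Str.len w) 1, ∃ L ∈ ([4, 5, 6, 7] : List Int),
        pvPatternCat.get? (PySem.Str.slice w (some i) (some (i + L))) = some y := by
  unfold pvScanHits
  rw [mem_foldl_step _ _
    (fun i y => ∃ L ∈ ([4, 5, 6, 7] : List Int),
      pvPatternCat.get? (PySem.Str.slice w (some i) (some (i + L))) = some y)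
    (fun s i z => by
      rw [mem_foldl_step _ _
        (fun L z => pvPatternCat.get? (PySem.Str.slice w (some i) (some (i + L))) = some z)
        (fun s L z => mem_matchAdd s _ z)])]
  simp [PySem.Set.empty]

-- the dictionary, characterised
set_option maxHeartbeats 1000000 in
theorem get?_pvPatternCat (q : String) (c : Int) :
    pvPatternCat.get? q = some c ↔
      (c = 0 ∧ (q = "love" ∨ q = "heart")) ∨
      (c = 1 ∧ (q = "light" ∨ q = "bright" ∨ q = "shine")) ∨
      (c = 2 ∧ (q = "dark" ∨ q = "shadow" ∨ q = "night")) ∨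
      (c = 3 ∧ (q = "time" ∨ q = "moment" ∨ q = "eternal")) := by
  have h : pvPatternCat = PySem.Dict.mk
    [("love", 0), ("heart", 0),
     ("light", 1), ("bright", 1), ("shine", 1),
     ("dark", 2), ("shadow", 2), ("night", 2),
     ("time", 3), ("moment", 3), ("eternal", 3)] := by decide
  rw [h]
  simp only [PySem.Dict.get?_mk_cons, beq_iff_eq]
  split_ifs <;> subst_vars <;> simp [PySem.Dict.get?, eq_comm (b := c)]; tauto

-- a window that equals p certifies p as a substring, and conversely every
-- substring of length 4..7 shows up as a window
theorem window_iff (w : String) (p : String) (Lp : Int)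
    (hL : Lp ∈ ([4, 5, 6, 7] : List Int)) (hlen : (p.toList.length : Int) = Lp) :
    (∃ i ∈ PySem.List.pyRange 0 (PySem.Str.len w) 1, ∃ L ∈ ([4, 5, 6, 7] : List Int),
        PySem.Str.slice w (some i) (some (i + L)) = p) ↔ PySem.Str.isIn p w = true := by
  rw [PySem.Str.isIn_iff_infix]
  constructor
  · rintro ⟨i, hi, L, hL4, hs⟩
    rw [PySem.List.mem_pyRange_one] at hi
    have h0L : (0 : Int) ≤ L := by
      simp [List.mem_cons] at hL4; rcases hL4 with h | h | h | h <;> omega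
    have hiL : (0 : Int) ≤ i + L := by omega
    have := congrArg String.toList hs
    simp only [PySem.Str.toList_slice, PySem.Chars.slice_eq_listSlice] at this
    rw [PySem.List.slice_toNat (ha := hi.1) (hb := hiL)] at this
    rw [← this]
    exact ((w.toList.drop i.toNat).take_prefix _).isInfix.trans
      (w.toList.drop_suffix i.toNat).isInfix
  · rintro ⟨a, t, hat⟩
    have hp4 : 4 ≤ p.toList.length := by
      simp [List.mem_cons] at hL; rcases hL with h | h | h | h <;> omega
    refine ⟨(a.length : Int), ?_, Lp, hL, ?_⟩
    · rw [PySem.List.mem_pyRange_one]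
      constructor
      · positivity
      · have hlw : w.toList.length = a.length + p.toList.length + t.length := by
          rw [← hat]; simp; omega
        have hwl : w.toList.length = w.length := String.length_toList
        simp only [PySem.Str.len_eq]
        omega
    · apply String.toList_inj.mp
      simp only [PySem.Str.toList_slice, PySem.Chars.slice_eq_listSlice]
      rw [← hlen, ← Nat.cast_add, PySem.List.slice_natCast]
      rw [← hat, List.append_assoc, List.drop_left, Nat.add_sub_cancel_left, List.take_left]

-- category c is hit iff one of its patterns occurs in w
theorem contains_scanHits (w : String) (c : Int) (pats : List String)
    (hc : ∀ q, pvPatternCat.get? q = some c ↔ q ∈ pats)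
    (hwin : ∀ p ∈ pats, ∃ Lp ∈ ([4,5,6,7] : List Int), (p.toList.length : Int) = Lp) :
    (pvScanHits w).contains c = pats.any (fun p => PySem.Str.isIn p w) := by
  rw [Bool.eq_iff_iff, PySem.Set.contains_iff, mem_scanHits]
  simp only [List.any_eq_true]
  constructor
  · rintro ⟨i, hi, L, hL, hget⟩
    rw [hc] at hget
    refine ⟨_, hget, ?_⟩
    obtain ⟨Lp, hLp, hlen⟩ := hwin _ hget
    exact (window_iff w _ Lp hLp hlen).1 ⟨i, hi, L, hL, rfl⟩
  · rintro ⟨p, hp, hin⟩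
    obtain ⟨Lp, hLp, hlen⟩ := hwin p hp
    obtain ⟨i, hi, L, hL, hs⟩ := (window_iff w p Lp hLp hlen).2 hin
    exact ⟨i, hi, L, hL, by rw [hs, hc]; exact hp⟩

-- ===== VERDICT =====
theorem create_word_context_py_spec : Claim_equal_create_word_context_py := by
  intro word _
  unfold Spec_create_word_context_py create_word_context_py create_word_context_py_alt
  have h0 := contains_scanHits (PySem.Str.lower word) 0 ["love", "heart"]
    (fun q => by rw [get?_pvPatternCat]; simp)
    (by decide)
  have h1 := contains_scanHits (PySem.Str.lower word) 1 ["light", "bright", "shine"]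
    (fun q => by rw [get?_pvPatternCat]; simp)
    (by decide)
  have h2 := contains_scanHits (PySem.Str.lower word) 2 ["dark", "shadow", "night"]
    (fun q => by rw [get?_pvPatternCat]; simp)
    (by decide)
  have h3 := contains_scanHits (PySem.Str.lower word) 3 ["time", "moment", "eternal"]
    (fun q => by rw [get?_pvPatternCat]; simp)
    (by decide)
  have henum : PySem.List.enumerate pvExtensions 0 =
      [(0, ["emotion", "feeling", "passion", "tender"]),
       (1, ["illumination", "radiance", "glow", "luminous"]),
       (2, ["darkness", "mystery", "hidden", "deep"]),
       (3, ["temporal", "duration", "infinity", "forever"])] := by decide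
  rw [henum]
  simp only [List.foldl]
  rw [h0, h1, h2, h3]
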